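/- GENERATED by farm/mkstatement.py from design/units.tsv (unit `DGifSlurp.COMPOSITION`) and the Specs of Gif/Spec/*.lean — do not edit.
   THE STATEMENT of the proof unit `DGifSlurp.COMPOSITION`: the function `DGifSlurp` (213 instructions) satisfies its contract,
   GIVEN THE STATEMENTS OF ITS 14 SEGMENTS (`Gif.Spec.DGifSlurp.Seg<k> Lay μ u₀`: what the unit `DGifSlurp.<k>` proves).
   No machine code is walked: `ReachVia.trans` along the segments (the exit assertion of a segment is the entry assertion of
   its successor), an induction on the loop measures. What the names mean: ProgX/Base/Spec/Basic.lean. The theorem to prove: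
   `theorem DGifSlurp_COMPOSITION_ok : Gif.Spec.DGifSlurp_COMPOSITION.Statement`. -/
import Gif.Code
import Gif.Dec.All
import Gif.Labels
import Gif.Spec.Seg_DGifSlurp
import Gif.Spec.Slurp
namespace Gif.Spec.DGifSlurp_COMPOSITION
open X86 X86.User Asan

/-- The statement of unit `DGifSlurp.COMPOSITION`. -/
def Statement : Prop :=
  ∀ (Lay : Layout) (_hLay : Lay.hi = 0x1000000) (μ : Microarch) (_hμ : UserX.MicroOK μ) (u₀ : State)
    (_h_DGifSlurp_P : Gif.Spec.DGifSlurp.SegP Lay μ u₀)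
    (_h_DGifSlurp_1 : Gif.Spec.DGifSlurp.Seg1 Lay μ u₀)
    (_h_DGifSlurp_2 : Gif.Spec.DGifSlurp.Seg2 Lay μ u₀)
    (_h_DGifSlurp_3 : Gif.Spec.DGifSlurp.Seg3 Lay μ u₀)
    (_h_DGifSlurp_4 : Gif.Spec.DGifSlurp.Seg4 Lay μ u₀)
    (_h_DGifSlurp_5 : Gif.Spec.DGifSlurp.Seg5 Lay μ u₀)
    (_h_DGifSlurp_6 : Gif.Spec.DGifSlurp.Seg6 Lay μ u₀)
    (_h_DGifSlurp_7 : Gif.Spec.DGifSlurp.Seg7 Lay μ u₀)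
    (_h_DGifSlurp_8 : Gif.Spec.DGifSlurp.Seg8 Lay μ u₀)
    (_h_DGifSlurp_9 : Gif.Spec.DGifSlurp.Seg9 Lay μ u₀)
    (_h_DGifSlurp_10 : Gif.Spec.DGifSlurp.Seg10 Lay μ u₀)
    (_h_DGifSlurp_11 : Gif.Spec.DGifSlurp.Seg11 Lay μ u₀)
    (_h_DGifSlurp_12 : Gif.Spec.DGifSlurp.Seg12 Lay μ u₀)
    (_h_DGifSlurp_E : Gif.Spec.DGifSlurp.SegE Lay μ u₀),
    ∀ (H : Heap) (rest : List Obj) (frames : List (Nat × FrameLayout)) (F : Forest) (R : Rd), Calls Lay μ ProgX.Base.WayInv (ProgX.Base.conv u₀) Gif.L.DGifSlurp.entry (Gif.Spec.DGifSlurp.spec H rest frames F R)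

end Gif.Spec.DGifSlurp_COMPOSITION
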